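-- pv_equiv track=rewrite | github.com/stjude/RNAIndel | rnaindel/defaultcaller/softclip_realigner.py | filter_indels
-- ===== SOURCE A (Python) =====
-- def filter_indels(indel_lst, min_occurrence):
--     indel_dict = {}
--     for _idl in indel_lst:
--         if indel_dict.get(_idl[0], None):
--             indel_stat = indel_dict[_idl[0]]
--             indel_stat[0].append(_idl[1])
--             indel_stat[1].append(_idl[2])
--         else:
--             indel_dict[_idl[0]] = [[_idl[1]], [_idl[2]]]
--
--     lst = []
--     for k, v in indel_dict.items():
--         if len(set(v[0])) >= min_occurrence:
--             lst.append(k)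
--     return lst
-- ===== SOURCE B (Python) =====
-- def filter_indels(indel_lst, min_occurrence):
--     seen = set()
--     counts = {}
--     for idl in indel_lst:
--         pair = (idl[0], idl[1])
--         if pair not in seen:
--             seen.add(pair)
--             counts[idl[0]] = counts.get(idl[0], 0) + 1
--     return [k for k, c in counts.items() if c >= min_occurrence]
-- ===== Notes on version B (the rewrite author's own statement) =====
-- stated objective: alternative
-- what changed: Single pass with incremental distinct counting via a seen-pair set and a count dict, replacing per-key two-list accumulation plus a len(set(...)) second pass; the unused second list is never built.
import Mathlib
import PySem

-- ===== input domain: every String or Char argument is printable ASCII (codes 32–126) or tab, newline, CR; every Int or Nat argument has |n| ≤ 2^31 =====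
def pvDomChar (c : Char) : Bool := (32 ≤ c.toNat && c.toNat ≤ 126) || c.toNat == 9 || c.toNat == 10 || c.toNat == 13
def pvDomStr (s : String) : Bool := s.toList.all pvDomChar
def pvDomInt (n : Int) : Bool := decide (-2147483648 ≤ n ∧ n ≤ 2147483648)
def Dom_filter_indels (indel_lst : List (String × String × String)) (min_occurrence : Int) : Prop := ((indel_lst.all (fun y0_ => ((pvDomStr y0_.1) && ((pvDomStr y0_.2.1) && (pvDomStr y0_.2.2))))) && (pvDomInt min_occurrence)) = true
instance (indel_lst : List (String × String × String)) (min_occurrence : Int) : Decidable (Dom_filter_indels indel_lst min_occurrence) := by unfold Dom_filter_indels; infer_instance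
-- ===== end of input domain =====

-- B replaces A's per-key two-list accumulation + len(set(..)) second pass by one pass of
-- incremental distinct counting (a seen-pair set and a count dict); same return value.

-- ===== PORT A =====
-- the body of A's first loop (dict.get truthiness = containment, since the stored value is always a non-empty list)
def pvStepA (d : PySem.Dict String (List String × List String)) (idl : String × String × String) :
    PySem.Dict String (List String × List String) :=
  if d.contains idl.1 then
    d.modify idl.1 ([], []) (fun v => (v.1 ++ [idl.2.1], v.2 ++ [idl.2.2]))
  else
    d.insert idl.1 ([idl.2.1], [idl.2.2])

def filter_indels (indel_lst : List (String × String × String)) (min_occurrence : Int) : List String :=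
  let indel_dict := indel_lst.foldl pvStepA PySem.Dict.empty
  indel_dict.items.foldl
    (fun lst kv => if min_occurrence ≤ PySem.Set.len (PySem.Set.ofList kv.2.1) then lst ++ [kv.1] else lst) []

-- ===== PORT B =====
-- the body of B's single loop: state = (seen pairs, per-key distinct counts)
def pvStepB (st : PySem.Set (String × String) × PySem.Dict String Int) (idl : String × String × String) :
    PySem.Set (String × String) × PySem.Dict String Int :=
  if st.1.contains (idl.1, idl.2.1) then st
  else (st.1.add (idl.1, idl.2.1), st.2.insert idl.1 (st.2.getD idl.1 0 + 1))

def filter_indels_alt (indel_lst : List (String × String × String)) (min_occurrence : Int) : List String :=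
  let st := indel_lst.foldl pvStepB (PySem.Set.empty, PySem.Dict.empty)
  (st.2.items.filter (fun kv => min_occurrence ≤ kv.2)).map (·.1)

-- ===== PRECONDITION & SPEC =====
def Spec_filter_indels (indel_lst : List (String × String × String)) (min_occurrence : Int) (out : List String) : Prop := out = filter_indels_alt indel_lst min_occurrence
instance (indel_lst : List (String × String × String)) (min_occurrence : Int) (out : List String) : Decidable (Spec_filter_indels indel_lst min_occurrence out) := by unfold Spec_filter_indels; infer_instance

-- ===== CLAIM (what is proved, stated in full; the proofs are below) =====
def Claim_equal_filter_indels : Prop := ∀ (indel_lst : List (String × String × String)) (min_occurrence : Int), Dom_filter_indels indel_lst min_occurrence → Spec_filter_indels indel_lst min_occurrence (filter_indels indel_lst min_occurrence)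

-- ===== LEMMAS AND PROOFS =====

-- B's count entry for a key is A's entry with the value replaced by its number of distinct positions
def pvG (kv : String × (List String × List String)) : String × Int :=
  (kv.1, ((PySem.Set.ofList kv.2.1).length : Int))

-- A's output loop, expressed on any items list, equals B's comprehension on the pvG-image
theorem pv_out (m : Int) (xs : List (String × (List String × List String))) (acc : List String) :
    xs.foldl (fun lst kv => if m ≤ PySem.Set.len (PySem.Set.ofList kv.2.1) then lst ++ [kv.1] else lst) acc =
    acc ++ ((xs.map pvG).filter (fun kv => m ≤ kv.2)).map (·.1) := by
  induction xs generalizing acc with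
  | nil => simp
  | cons kv xs ih =>
    rw [List.foldl_cons, ih]
    by_cases hm : m ≤ PySem.Set.len (PySem.Set.ofList kv.2.1)
    · simp [pvG, PySem.Set.len] at *
      simp [hm]
    · simp [pvG, PySem.Set.len] at hm ⊢
      simp [hm]

-- loop invariant: after any prefix, B's count dict is the pvG-image of A's dict, and B's seen set
-- holds exactly the (key, position) pairs recorded in A's dict
theorem pv_loop_inv (l : List (String × String × String))
    (d : PySem.Dict String (List String × List String))
    (seen : PySem.Set (String × String)) (counts : PySem.Dict String Int)
    (h1 : counts.items = d.items.map pvG)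
    (h2 : ∀ k p, ((k, p) ∈ seen) ↔ ∃ v, d.get? k = some v ∧ p ∈ v.1)
    (h3 : d.keys.Nodup) :
    (l.foldl pvStepB (seen, counts)).2.items = (l.foldl pvStepA d).items.map pvG := by
  induction l generalizing d seen counts with
  | nil => simpa using h1
  | cons a l ih =>
    obtain ⟨k, p, x⟩ := a
    have hkeys : counts.keys = d.keys := by
      simp only [PySem.Dict.keys, h1, List.map_map]
      exact List.map_congr_left (fun q _ => rfl)
    simp only [List.foldl_cons]
    cases hc : d.contains k with
    | true =>
      obtain ⟨v, hv⟩ : ∃ v, d.get? k = some v := by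
        have h := PySem.Dict.contains_eq_isSome_get? d k
        rw [hc] at h
        exact Option.isSome_iff_exists.mp h.symm
      have hgetD : d.getD k ([], []) = v := by
        rw [PySem.Dict.getD_eq_get?_getD, hv]; rfl
      have hmemitems : (k, v) ∈ d.items := PySem.Dict.mem_items_of_get?_eq_some d hv
      have hstepA : pvStepA d (k, p, x) = d.insert k (v.1 ++ [p], v.2 ++ [x]) := by
        simp [pvStepA, hc, PySem.Dict.modify, hgetD]
      have huniq : ∀ q ∈ d.items, q.1 = k → q = (k, v) := by
        intro q hq hqk
        obtain ⟨qk, qv⟩ := q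
        simp only at hqk; subst hqk
        have h := PySem.Dict.get?_of_mem_items d hq h3
        rw [hv] at h
        simpa using h.symm
      have hccont : counts.contains k = true := by
        rw [PySem.Dict.contains_eq_decide_mem_keys, hkeys]
        simpa using PySem.Dict.mem_keys_of_mem_items d hmemitems
      have hcmem : (k, ((PySem.Set.ofList v.1).length : Int)) ∈ counts.items := by
        rw [h1]
        exact List.mem_map_of_mem hmemitems
      have hcnodup : counts.keys.Nodup := by rw [hkeys]; exact h3
      have hcgetD : counts.getD k 0 = ((PySem.Set.ofList v.1).length : Int) :=
        PySem.Dict.getD_of_mem_items counts hcmem hcnodup 0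
      by_cases hp : p ∈ v.1
      · -- pair already recorded: B does nothing, A's new value has the same distinct count
        have hseen : seen.contains (k, p) = true :=
          (PySem.Set.contains_iff seen (k, p)).mpr ((h2 k p).mpr ⟨v, hv, hp⟩)
        have hstepB : pvStepB (seen, counts) (k, p, x) = (seen, counts) := by
          unfold pvStepB; rw [hseen]; rfl
        rw [hstepB, hstepA]
        apply ih
        · rw [PySem.Dict.items_insert_of_contains d _ hc, List.map_map, h1]
          apply List.map_congr_left
          intro q hq
          by_cases hqk : q.1 = k
          · have hqv := huniq q hq hqk
            subst hqv
            have hofl : PySem.Set.ofList (v.1 ++ [p]) = PySem.Set.ofList v.1 := by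
              rw [PySem.Set.ofList_append_singleton]
              exact PySem.Set.add_of_mem ((PySem.Set.mem_ofList v.1 p).mpr hp)
            simp [pvG, Function.comp, hofl]
          · have hbeq : (q.1 == k) = false := by simpa using hqk
            simp [Function.comp, hbeq]
        · intro k' p'
          rw [h2 k' p', PySem.Dict.get?_insert]
          by_cases hk' : k' = k
          · subst hk'
            simp only [hv, reduceIte]
            constructor
            · rintro ⟨v', hv', hp'⟩
              cases hv'
              exact ⟨_, rfl, by simp [hp']⟩
            · rintro ⟨v', hv', hp'⟩
              cases hv'
              rcases List.mem_append.mp hp' with h' | h'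
              · exact ⟨v, rfl, h'⟩
              · simp at h'; subst h'; exact ⟨v, rfl, hp⟩
          · simp [hk']
        · rw [PySem.Dict.keys_insert_of_contains d _ hc]; exact h3
      · -- new pair for an existing key: both sides bump the distinct count of k by one
        have hseen : seen.contains (k, p) = false := by
          rw [Bool.eq_false_iff]
          intro h
          obtain ⟨v', hv', hp'⟩ := (h2 k p).mp ((PySem.Set.contains_iff seen (k, p)).mp h)
          rw [hv] at hv'; cases hv'
          exact hp hp'
        have hstepB : pvStepB (seen, counts) (k, p, x) =
            (seen.add (k, p), counts.insert k (counts.getD k 0 + 1)) := by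
          unfold pvStepB; rw [hseen]; rfl
        have hofl : PySem.Set.ofList (v.1 ++ [p]) = PySem.Set.ofList v.1 ++ [p] := by
          rw [PySem.Set.ofList_append_singleton]
          exact PySem.Set.add_of_not_mem (fun h => hp ((PySem.Set.mem_ofList v.1 p).mp h))
        rw [hstepB, hstepA]
        apply ih
        · rw [PySem.Dict.items_insert_of_contains counts _ hccont,
            PySem.Dict.items_insert_of_contains d _ hc, List.map_map, h1, List.map_map]
          apply List.map_congr_left
          intro q hq
          by_cases hqk : q.1 = k
          · have hqv := huniq q hq hqk
            subst hqv
            simp [pvG, Function.comp, hofl, hcgetD]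
          · have hbeq : (q.1 == k) = false := by simpa using hqk
            simp [pvG, Function.comp, hbeq]
        · intro k' p'
          rw [PySem.Set.mem_add, h2 k' p', PySem.Dict.get?_insert]
          by_cases hk' : k' = k
          · subst hk'
            simp only [hv, reduceIte]
            constructor
            · rintro (⟨v', hv', hp'⟩ | hpp)
              · cases hv'; exact ⟨_, rfl, by simp [hp']⟩
              · cases hpp; exact ⟨_, rfl, by simp⟩
            · rintro ⟨v', hv', hp'⟩
              cases hv'
              rcases List.mem_append.mp hp' with h' | h'
              · exact Or.inl ⟨v, rfl, h'⟩
              · simp at h'; subst h'; exact Or.inr rfl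
          · simp only [if_neg hk']
            constructor
            · rintro (h' | hpp)
              · exact h'
              · cases hpp; exact absurd rfl hk'
            · exact Or.inl
        · rw [PySem.Dict.keys_insert_of_contains d _ hc]; exact h3
    | false =>
      -- fresh key: both sides append a new entry
      have hget : d.get? k = none := (PySem.Dict.get?_eq_none_iff_contains d k).mpr hc
      have hnk : k ∉ d.keys := by
        have h := PySem.Dict.contains_eq_decide_mem_keys d k
        rw [hc] at h
        simpa using h.symm
      have hseen : seen.contains (k, p) = false := by
        rw [Bool.eq_false_iff]
        intro h
        obtain ⟨v', hv', -⟩ := (h2 k p).mp ((PySem.Set.contains_iff seen (k, p)).mp h)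
        rw [hget] at hv'; cases hv'
      have hccont : counts.contains k = false := by
        rw [PySem.Dict.contains_eq_decide_mem_keys, hkeys]
        simpa using hnk
      have hstepA : pvStepA d (k, p, x) = d.insert k ([p], [x]) := by
        simp [pvStepA, hc]
      have hstepB : pvStepB (seen, counts) (k, p, x) =
          (seen.add (k, p), counts.insert k 1) := by
        unfold pvStepB; rw [hseen, PySem.Dict.getD_of_not_contains counts 0 hccont]; rfl
      rw [hstepB, hstepA]
      apply ih
      · rw [PySem.Dict.items_insert_of_not_contains counts _ hccont,
          PySem.Dict.items_insert_of_not_contains d _ hc, List.map_append, h1]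
        simp [pvG, PySem.Set.ofList]
      · intro k' p'
        rw [PySem.Set.mem_add, h2 k' p', PySem.Dict.get?_insert]
        by_cases hk' : k' = k
        · subst hk'
          simp only [hget, reduceIte]
          constructor
          · rintro (⟨v', hv', -⟩ | hpp)
            · cases hv'
            · cases hpp; exact ⟨_, rfl, by simp⟩
          · rintro ⟨v', hv', hp'⟩
            cases hv'
            simp at hp'; subst hp'; exact Or.inr rfl
        · simp only [if_neg hk']
          constructor
          · rintro (h' | hpp)
            · exact h'
            · cases hpp; exact absurd rfl hk'
          · exact Or.inl
      · rw [PySem.Dict.keys_insert_of_not_contains d _ hc]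
        simp only [List.nodup_append, List.nodup_cons, List.not_mem_nil, not_false_iff, List.nodup_nil, and_true, true_and]
        refine ⟨h3, ?_⟩
        intro a ha b hb
        simp only [List.mem_singleton] at hb
        subst hb
        exact fun h => hnk (h ▸ ha)

-- ===== VERDICT (by name: the statement is the Claim_ definition above) =====
theorem filter_indels_spec : Claim_equal_filter_indels := by
  intro l m _
  show filter_indels l m = filter_indels_alt l m
  have h := pv_loop_inv l PySem.Dict.empty PySem.Set.empty PySem.Dict.empty (by rfl)
    (by
      intro k p
      constructor
      · intro hc; simp [PySem.Set.empty] at hc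
      · rintro ⟨v, hv, -⟩; simp [PySem.Dict.get?_empty] at hv)
    (by simp [PySem.Dict.keys_empty])
  show (l.foldl pvStepA PySem.Dict.empty).items.foldl
      (fun lst kv => if m ≤ PySem.Set.len (PySem.Set.ofList kv.2.1) then lst ++ [kv.1] else lst) [] =
    ((l.foldl pvStepB (PySem.Set.empty, PySem.Dict.empty)).2.items.filter (fun kv => m ≤ kv.2)).map (·.1)
  rw [h, pv_out]
  simp
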